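-- pv_equiv track=rewrite | github.com/EmilioPeJu/problems | aoc23_day11_1.py | get_empty_sum
-- ===== SOURCE A (Python) =====
-- def is_row_empty(image, ri):
--     for i in range(len(image[0])):
--         if image[ri][i] != '.':
--             return False
--
--     return True
--
-- def is_col_empty(image, ci):
--     for i in range(len(image)):
--         if image[i][ci] != '.':
--             return False
--
--     return True
--
-- def get_empty_sum(image):
--     rows = [0] * len(image)
--     cols = [0] * len(image[0])
--     rows[0] = int(is_row_empty(image, 0))
--     for ri in range(1, len(image)):
--         rows[ri] = rows[ri - 1] + int(is_row_empty(image, ri))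
--
--     cols[0] = int(is_col_empty(image, 0))
--     for ci in range(1, len(image[0])):
--         cols[ci] = cols[ci - 1] + int(is_col_empty(image, ci))
--
--     return rows, cols
-- ===== SOURCE B (Python) =====
-- def get_empty_sum(image):
--     w = len(image[0])
--     col_ne = [False] * w
--     rows = []
--     t = 0
--     for i in range(len(image)):
--         cells = [image[i][ci] != '.' for ci in range(w)]
--         t += 0 if any(cells) else 1
--         rows.append(t)
--         col_ne = [f or c for f, c in zip(col_ne, cells)]
--     cols = []
--     t = 0
--     for f in col_ne:
--         t += 0 if f else 1
--         cols.append(t)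
--     return rows, cols
-- ===== Notes on version B (the rewrite author's own statement) =====
-- stated objective: alternative
-- what changed: B replaces A's two separate index scans with helper predicates (each cell read twice) by one fused row-major pass that builds the row prefix sums on the fly and accumulates column-nonempty flags, followed by a single accumulation over the flags.
-- outside the precondition, e.g. on get_empty_sum(['., ab', 'ab\r\nEF', 'zb@x']): A returns ([0, 0, 0], [0, 0, 0, 0, 0]), B raises IndexError
import Mathlib
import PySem

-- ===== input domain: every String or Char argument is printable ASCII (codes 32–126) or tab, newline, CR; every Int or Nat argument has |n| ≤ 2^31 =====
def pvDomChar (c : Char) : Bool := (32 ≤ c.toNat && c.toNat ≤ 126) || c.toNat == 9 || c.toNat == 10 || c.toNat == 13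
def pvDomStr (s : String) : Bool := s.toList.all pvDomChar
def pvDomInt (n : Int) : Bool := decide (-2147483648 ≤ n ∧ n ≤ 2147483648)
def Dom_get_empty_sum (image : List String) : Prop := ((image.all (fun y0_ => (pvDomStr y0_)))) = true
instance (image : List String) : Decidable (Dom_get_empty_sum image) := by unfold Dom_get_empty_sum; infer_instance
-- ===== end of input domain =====

-- B fuses A's two separate scans (per-row and per-column helper rescans) into one
-- row-major pass that builds the row prefix sums on the fly while accumulating
-- column-nonempty flags; same cost, different decomposition (objective: alternative).

-- ===== PORT A =====
def pyBint (b : Bool) : Int := if b then 1 else 0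

-- for i in range(len(image[0])): if image[ri][i] != '.': return False / return True
def is_row_empty (image : List String) (ri : Nat) : Bool :=
  (List.range (image.headD "").length).all
    (fun i => ((image.getD ri "").toList.getD i ' ') == '.')

def is_col_empty (image : List String) (ci : Nat) : Bool :=
  (List.range image.length).all
    (fun i => ((image.getD i "").toList.getD ci ' ') == '.')

def get_empty_sum (image : List String) : List Int × List Int :=
  let n := image.length
  let w := (image.headD "").length
  let r0 : Int := pyBint (is_row_empty image 0)
  let rows := ((List.range' 1 (n - 1)).foldl
      (fun (acc : List Int × Int) ri =>
        (acc.1 ++ [acc.2 + pyBint (is_row_empty image ri)],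
         acc.2 + pyBint (is_row_empty image ri))) ([r0], r0)).1
  let c0 : Int := pyBint (is_col_empty image 0)
  let cols := ((List.range' 1 (w - 1)).foldl
      (fun (acc : List Int × Int) ci =>
        (acc.1 ++ [acc.2 + pyBint (is_col_empty image ci)],
         acc.2 + pyBint (is_col_empty image ci))) ([c0], c0)).1
  (rows, cols)

-- ===== PORT B =====
def get_empty_sum_alt (image : List String) : List Int × List Int :=
  let w := (image.headD "").length
  let st := (List.range image.length).foldl
    (fun (st : List Bool × List Int × Int) i =>
      let cells := (List.range w).map
        (fun ci => ((image.getD i "").toList.getD ci ' ') != '.')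
      let t := st.2.2 + (if cells.any id then 0 else 1)
      (List.zipWith (fun f c => f || c) st.1 cells, st.2.1 ++ [t], t))
    (List.replicate w false, ([], 0))
  let cols := (st.1.foldl
      (fun (p : List Int × Int) f =>
        (p.1 ++ [p.2 + (if f then 0 else 1)], p.2 + (if f then 0 else 1))) ([], 0)).1
  (st.2.1, cols)

-- ===== PRECONDITION & SPEC =====
-- Pre_ excludes empty images, a zero-width first row, and jagged images with a row
-- shorter than len(image[0]): there A usually raises IndexError, but its early
-- 'return False' can dodge the short row and return, while B (which reads every cell
-- unconditionally) raises IndexError.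
def Pre_get_empty_sum (image : List String) : Prop :=
  image ≠ [] ∧ 0 < (image.headD "").length ∧
    ∀ s ∈ image, (image.headD "").length ≤ s.length
instance (image : List String) : Decidable (Pre_get_empty_sum image) := by
  unfold Pre_get_empty_sum; infer_instance

def pvWitness_get_empty_sum : List String := ["#.", ".."]

def Spec_get_empty_sum (image : List String) (out : List Int × List Int) : Prop := out = get_empty_sum_alt image
instance (image : List String) (out : List Int × List Int) : Decidable (Spec_get_empty_sum image out) := by unfold Spec_get_empty_sum; infer_instance

-- ===== CLAIM (what is proved, stated in full; the proofs are below) =====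
def Claim_equal_get_empty_sum : Prop := ∀ (image : List String), Dom_get_empty_sum image → Pre_get_empty_sum image → Spec_get_empty_sum image (get_empty_sum image)

-- ===== LEMMAS AND PROOFS =====

-- running prefix sums of g over 0..n-1
def pSum (g : Nat → Int) : Nat → Int
  | 0 => 0
  | n+1 => pSum g n + g n

def pList (g : Nat → Int) : Nat → List Int
  | 0 => []
  | n+1 => pList g n ++ [pSum g (n+1)]

def gRow (image : List String) (i : Nat) : Int := pyBint (is_row_empty image i)
def gCol (image : List String) (c : Nat) : Int := pyBint (is_col_empty image c)

theorem gRow_def (image : List String) (i : Nat) :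
    pyBint (is_row_empty image i) = gRow image i := rfl
theorem gCol_def (image : List String) (c : Nat) :
    pyBint (is_col_empty image c) = gCol image c := rfl

def chD (image : List String) (i c : Nat) : Bool :=
  ((image.getD i "").toList.getD c ' ') != '.'

def colFlags (image : List String) (n : Nat) : List Bool :=
  (List.range (image.headD "").length).map
    (fun c => (List.range n).any (fun i => chD image i c))

theorem any_not_eq_not_all {α : Type} (l : List α) (p : α → Bool) :
    l.any (fun a => !p a) = !l.all p := by
  induction l with
  | nil => simp
  | cons a l ih => simp [ih]

theorem zipWith_self {α β : Type} (f : α → α → β) (l : List α) :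
    List.zipWith f l l = l.map (fun a => f a a) := by
  induction l with
  | nil => rfl
  | cons a l ih => simp

theorem foldl_range_psum (g : Nat → Int) (n : Nat) :
    (List.range n).foldl
      (fun (acc : List Int × Int) k => (acc.1 ++ [acc.2 + g k], acc.2 + g k)) ([], 0)
    = (pList g n, pSum g n) := by
  induction n with
  | zero => simp [pList, pSum]
  | succ n ih => simp [List.range_succ, ih, pList, pSum]

theorem foldl_range'_psum (g : Nat → Int) (len : Nat) :
    (List.range' 1 len).foldl
      (fun (acc : List Int × Int) k => (acc.1 ++ [acc.2 + g k], acc.2 + g k))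
      ([pSum g 1], pSum g 1)
    = (pList g (len+1), pSum g (len+1)) := by
  induction len with
  | zero => simp [pList, pSum]
  | succ len ih =>
    rw [List.range'_concat, List.foldl_append, ih]
    simp [pList, pSum, Nat.add_comm 1 len]

theorem bint_row (image : List String) (i : Nat) :
    (if ((List.range (image.headD "").length).map
          (fun ci => ((image.getD i "").toList.getD ci ' ') != '.')).any id
     then (0:Int) else 1) = gRow image i := by
  have h : ((List.range (image.headD "").length).map
        (fun ci => ((image.getD i "").toList.getD ci ' ') != '.')).any id
      = !is_row_empty image i := by
    rw [List.any_map]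
    simpa [Function.comp, bne, is_row_empty] using
      any_not_eq_not_all (List.range (image.headD "").length)
        (fun ci => ((image.getD i "").toList.getD ci ' ') == '.')
  rw [h, gRow, pyBint]
  cases is_row_empty image i <;> simp

theorem flag_col (image : List String) (c : Nat) :
    (List.range image.length).any (fun i => chD image i c)
      = !is_col_empty image c := by
  simpa [chD, Function.comp, bne, is_col_empty] using
    any_not_eq_not_all (List.range image.length)
      (fun i => ((image.getD i "").toList.getD c ' ') == '.')

theorem outerB (image : List String) (n : Nat) :
    (List.range n).foldl
      (fun (st : List Bool × List Int × Int) i =>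
        let cells := (List.range (image.headD "").length).map
          (fun ci => ((image.getD i "").toList.getD ci ' ') != '.')
        let t := st.2.2 + (if cells.any id then 0 else 1)
        (List.zipWith (fun f c => f || c) st.1 cells, st.2.1 ++ [t], t))
      (List.replicate (image.headD "").length false, ([], 0))
    = (colFlags image n, (pList (gRow image) n, pSum (gRow image) n)) := by
  induction n with
  | zero =>
    simp [colFlags, pList, pSum, List.map_const']
  | succ n ih =>
    rw [List.range_succ, List.foldl_append, ih]
    simp only [List.foldl_cons, List.foldl_nil, bint_row]
    refine Prod.ext ?_ (Prod.ext ?_ ?_)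
    · show List.zipWith _ (colFlags image n) _ = colFlags image (n+1)
      simp only [colFlags, List.zipWith_map]
      rw [zipWith_self]
      refine List.map_congr_left (fun c _ => ?_)
      simp [List.range_succ, chD]
    · show pList (gRow image) n ++ _ = pList (gRow image) (n+1)
      simp [pList, pSum]
    · show pSum (gRow image) n + _ = pSum (gRow image) (n+1)
      simp [pSum]

-- ===== VERDICT (by name: the statement is the Claim_ definition above) =====
theorem get_empty_sum_spec : Claim_equal_get_empty_sum := by
  intro image _ hpre
  obtain ⟨hne, hw, -⟩ := hpre
  unfold Spec_get_empty_sum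
  simp only [get_empty_sum, get_empty_sum_alt]
  have hn : 0 < image.length := List.length_pos_iff.mpr hne
  rw [outerB image image.length]
  -- rows (A side)
  simp only [gRow_def, gCol_def]
  have hrowinit : gRow image 0 = pSum (gRow image) 1 := by simp [pSum]
  have hcolinit : gCol image 0 = pSum (gCol image) 1 := by simp [pSum]
  rw [hrowinit, hcolinit, foldl_range'_psum, foldl_range'_psum,
    Nat.sub_add_cancel hn, Nat.sub_add_cancel hw]
  -- cols (B side)
  have hcols :
      (colFlags image image.length).foldl
        (fun (p : List Int × Int) f =>
          (p.1 ++ [p.2 + (if f then 0 else 1)], p.2 + (if f then 0 else 1))) ([], 0)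
      = (pList (gCol image) (image.headD "").length,
         pSum (gCol image) (image.headD "").length) := by
    rw [colFlags, List.foldl_map]
    have hfun : (fun (p : List Int × Int) (c : Nat) =>
        (p.1 ++ [p.2 + (if (List.range image.length).any (fun i => chD image i c) then 0 else 1)],
         p.2 + (if (List.range image.length).any (fun i => chD image i c) then 0 else 1)))
        = (fun (p : List Int × Int) (c : Nat) => (p.1 ++ [p.2 + gCol image c], p.2 + gCol image c)) := by
      funext p c
      rw [flag_col, gCol, pyBint]
      cases is_col_empty image c <;> simp
    rw [hfun, foldl_range_psum]
  rw [hcols]
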